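-- pv_equiv track=rewrite | github.com/RissRossApplesauce/DKC3 | 2018/Names.py | solve
-- ===== SOURCE A (Python) =====
-- def solve(x, n):
--     x = x.split('\n')
--     target = x[0]
--     x.sort()
--
--     def score(name):
--         sum = 0
--         for c in name.lower():
--             sum += ord(c) - ord('a') + 1
--         return sum
--
--     return f'{target} - {score(target) * (x.index(target) + 1)}'
-- ===== SOURCE B (Python) =====
-- def solve(x, n):
--     names = x.split('\n')
--     target = names[0]
--     rank = 1 + sum(1 for name in names if name < target)
--     score = sum(ord(c) - ord('a') + 1 for c in target.lower())
--     return f'{target} - {score * rank}'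
-- ===== Notes on version B (the rewrite author's own statement) =====
-- stated objective: simpler
-- what changed: B removes the sort and the list.index scan: the 1-based rank of the target is computed directly in one linear pass as 1 + the number of names strictly smaller than the target (which equals the first-occurrence index in the sorted list, even with duplicates).
import Mathlib
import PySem

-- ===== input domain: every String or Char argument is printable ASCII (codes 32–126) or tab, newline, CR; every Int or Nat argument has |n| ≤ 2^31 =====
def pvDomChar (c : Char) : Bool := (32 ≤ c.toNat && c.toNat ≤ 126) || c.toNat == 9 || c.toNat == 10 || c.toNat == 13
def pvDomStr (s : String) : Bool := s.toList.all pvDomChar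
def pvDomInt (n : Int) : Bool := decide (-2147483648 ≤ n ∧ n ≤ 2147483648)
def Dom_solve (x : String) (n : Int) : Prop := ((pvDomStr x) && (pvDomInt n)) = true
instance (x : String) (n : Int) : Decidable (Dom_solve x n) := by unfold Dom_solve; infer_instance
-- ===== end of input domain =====

-- B replaces A's sort + list.index scan by a single linear pass counting names strictly
-- smaller than the target (objective: simpler).

-- ===== PORT A =====
def solveScore (name : String) : Int :=
  (PySem.Str.lower name).toList.foldl (fun s c => s + ((c.toNat : Int) - ('a'.toNat : Int) + 1)) 0

def solve (x : String) (n : Int) : String :=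
  let lines := (PySem.Str.split? x "\n").getD []      -- sep "\n" ≠ "" so split? is always some
  let target := PySem.List.pyGetD lines 0 ""          -- split never returns [], so x[0] is in range
  let sortedLines := PySem.List.sorted lines (fun s => s) false
  let idx := (PySem.List.index? sortedLines target).getD 0   -- target = lines[0] is in the list, so index? is some
  target ++ " - " ++ PySem.Int.toStr (solveScore target * ((idx : Int) + 1))

-- ===== PORT B =====
def solve_alt (x : String) (n : Int) : String :=
  let names := (PySem.Str.split? x "\n").getD []
  let target := PySem.List.pyGetD names 0 ""
  let rank : Int := 1 + (names.countP (fun name => decide (name < target)) : Int)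
  let score : Int := ((PySem.Str.lower target).toList.map (fun c => (c.toNat : Int) - ('a'.toNat : Int) + 1)).sum
  target ++ " - " ++ PySem.Int.toStr (score * rank)

-- ===== PRECONDITION & SPEC =====
def Spec_solve (x : String) (n : Int) (out : String) : Prop := out = solve_alt x n
instance (x : String) (n : Int) (out : String) : Decidable (Spec_solve x n out) := by unfold Spec_solve; infer_instance

-- ===== CLAIM (what is proved, stated in full; the proofs are below) =====
def Claim_equal_solve : Prop := ∀ (x : String) (n : Int), Dom_solve x n → Spec_solve x n (solve x n)

-- ===== LEMMAS AND PROOFS =====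

-- splitOn.go never returns the empty list
lemma splitOn_go_ne_nil (sep : List Char) (fuel : Nat) (l cur : List Char) (acc : List (List Char)) :
    PySem.Chars.splitOn.go sep fuel l cur acc ≠ [] := by
  induction fuel generalizing l cur acc with
  | zero =>
    simp [PySem.Chars.splitOn.go]
  | succ fuel ih =>
    cases l with
    | nil => simp [PySem.Chars.splitOn.go]
    | cons c rest =>
      rw [PySem.Chars.splitOn.go]
      split_ifs with h
      · exact ih _ _ _
      · exact ih _ _ _

lemma splitOn_ne_nil (s sep : List Char) : PySem.Chars.splitOn s sep ≠ [] := by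
  unfold PySem.Chars.splitOn
  exact splitOn_go_ne_nil _ _ _ _ _

-- the first-occurrence index in a ≤-sorted list is the number of strictly smaller elements
lemma index?_sorted_eq_countP (ys : List String) (t : String)
    (hp : ys.Pairwise (· ≤ ·)) (ht : t ∈ ys) :
    PySem.List.index? ys t = some (ys.countP (fun s => decide (s < t))) := by
  induction ys with
  | nil => cases ht
  | cons y ys ih =>
    rcases List.pairwise_cons.mp hp with ⟨hy, hp'⟩
    by_cases hyt : y = t
    · subst hyt
      have hzero : ys.countP (fun s => decide (s < y)) = 0 := by
        apply List.countP_eq_zero.mpr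
        intro s hs
        simpa using not_lt_of_ge (hy s hs)
      have hyy : (decide (y < y)) = false := by simp
      rw [PySem.List.index?_cons_self, List.countP_cons, hzero, hyy]
      rfl
    · have ht' : t ∈ ys := by
        rcases List.mem_cons.mp ht with h | h
        · exact absurd h.symm hyt
        · exact h
      have hlt : y < t := lt_of_le_of_ne (hy t ht') hyt
      have hd : (decide (y < t)) = true := decide_eq_true hlt
      rw [PySem.List.index?_cons_of_ne _ hyt, ih hp' ht', List.countP_cons, hd]
      rfl

lemma sum_map_eq_foldl (f : Char → Int) (cs : List Char) :
    (cs.map f).sum = cs.foldl (fun s c => s + f c) 0 := by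
  have h : ∀ (a : Int), cs.foldl (fun s c => s + f c) a = a + (cs.map f).sum := by
    induction cs with
    | nil => simp
    | cons c cs ih => intro a; simp [List.foldl_cons, ih, add_assoc]
  simp [h 0]

-- ===== VERDICT (by name: the statement is the Claim_ definition above) =====

theorem solve_spec : Claim_equal_solve := by
  intro x n _
  unfold Spec_solve solve solve_alt
  have hsplit : PySem.Str.split? x "\n" = some (((PySem.Chars.splitOn x.toList ['\n'])).map String.ofList) := by
    simp [PySem.Str.split?, PySem.Chars.split?]
  obtain ⟨c0, cs, hcons⟩ :
      ∃ c0 cs, PySem.Chars.splitOn x.toList ['\n'] = c0 :: cs := by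
    cases h : PySem.Chars.splitOn x.toList ['\n'] with
    | nil => exact absurd h (splitOn_ne_nil _ _)
    | cons a b => exact ⟨a, b, rfl⟩
  rw [hsplit, hcons]
  simp only [List.map_cons, Option.getD_some]
  have hget : PySem.List.pyGetD (String.ofList c0 :: List.map String.ofList cs) 0 "" = String.ofList c0 := by
    simp [PySem.List.pyGetD, PySem.List.pyGet?, PySem.List.pyIdx?]
  simp only [hget]
  have htmem : String.ofList c0 ∈ (String.ofList c0 :: List.map String.ofList cs) :=
    List.mem_cons_self
  have hmem := (PySem.List.mem_sorted (String.ofList c0 :: List.map String.ofList cs)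
    (fun s => s) false (String.ofList c0)).mpr htmem
  have hidx := index?_sorted_eq_countP _ _
    (PySem.List.sorted_pairwise (String.ofList c0 :: List.map String.ofList cs) (fun s => s)) hmem
  rw [hidx, Option.getD_some,
    (PySem.List.sorted_perm (String.ofList c0 :: List.map String.ofList cs) (fun s => s) false).countP_eq]
  apply congrArg (fun z : Int => String.ofList c0 ++ " - " ++ PySem.Int.toStr z)
  have hs : solveScore (String.ofList c0)
      = ((PySem.Str.lower (String.ofList c0)).toList.map
          (fun c => (c.toNat : Int) - ('a'.toNat : Int) + 1)).sum := by
    rw [sum_map_eq_foldl]; rfl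
  rw [hs]
  ring
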